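-- pv_equiv track=rewrite | github.com/holonomos/NetWatch | importer/ip_remapper.py | _rack_number
-- ===== SOURCE A (Python) =====
-- def _rack_number(rack: str | None) -> int | None:
--     if not rack:
--         return None
--     for part in reversed(rack.split("-")):
--         try:
--             return int(part)
--         except ValueError:
--             continue
--     return None
-- ===== SOURCE B (Python) =====
-- def _rack_number(rack):
--     if not rack:
--         return None
--     result = None
--     for part in rack.split("-"):
--         try:
--             result = int(part)
--         except ValueError:
--             continue
--     return result
-- ===== Notes on version B (the rewrite author's own statement) =====
-- stated objective: alternative
-- what changed: Replaces A's reversed scan with early return by a single forward pass that keeps the last parseable segment in an accumulator and returns it after the loop.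
import Mathlib
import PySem

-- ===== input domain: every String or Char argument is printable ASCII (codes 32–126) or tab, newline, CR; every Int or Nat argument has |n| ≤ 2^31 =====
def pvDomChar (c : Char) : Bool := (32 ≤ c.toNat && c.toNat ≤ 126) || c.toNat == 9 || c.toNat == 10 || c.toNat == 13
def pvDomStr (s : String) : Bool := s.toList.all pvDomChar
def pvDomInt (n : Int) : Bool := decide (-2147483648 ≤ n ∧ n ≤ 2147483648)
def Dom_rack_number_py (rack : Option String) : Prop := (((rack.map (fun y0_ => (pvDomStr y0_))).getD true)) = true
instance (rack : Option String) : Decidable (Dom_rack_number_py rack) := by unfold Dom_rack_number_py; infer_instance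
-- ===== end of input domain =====

-- B replaces A's reversed scan with early return by a forward pass keeping the last parseable segment (alternative decomposition, same cost).

-- ===== PORT A =====
-- first part (in the given order) that parses as an int; `continue` on ValueError
def rackAFind : List String → Option Int
  | [] => none
  | p :: rest =>
    match PySem.Int.ofStr? p with
    | some n => some n
    | none => rackAFind rest

def rack_number_py (rack : Option String) : Option Int :=
  match rack with
  | none => none
  | some s => if s = "" then none else rackAFind ((PySem.Str.split? s "-").getD []).reverse

-- ===== PORT B =====
def rack_number_py_alt (rack : Option String) : Option Int :=
  match rack with
  | none => none
  | some s =>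
    if s = "" then none else
      ((PySem.Str.split? s "-").getD []).foldl
        (fun result p =>
          match PySem.Int.ofStr? p with
          | some n => some n
          | none => result) none

-- ===== PRECONDITION & SPEC =====
def Spec_rack_number_py (rack : Option String) (out : Option Int) : Prop := out = rack_number_py_alt rack
instance (rack : Option String) (out : Option Int) : Decidable (Spec_rack_number_py rack out) := by unfold Spec_rack_number_py; infer_instance

-- ===== CLAIM (what is proved, stated in full; the proofs are below) =====
def Claim_equal_rack_number_py : Prop := ∀ (rack : Option String), Dom_rack_number_py rack → Spec_rack_number_py rack (rack_number_py rack)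

-- ===== LEMMAS AND PROOFS =====
theorem rackAFind_append_singleton (xs : List String) (p : String) :
    rackAFind (xs ++ [p]) =
      match rackAFind xs with
      | some n => some n
      | none => match PySem.Int.ofStr? p with
                | some n => some n
                | none => none := by
  induction xs with
  | nil => simp [rackAFind]
  | cons q rest ih =>
    simp only [List.cons_append, rackAFind]
    cases PySem.Int.ofStr? q <;> simp [ih]

theorem foldl_eq_rackAFind_reverse (l : List String) (acc : Option Int) :
    l.foldl (fun result p =>
        match PySem.Int.ofStr? p with
        | some n => some n
        | none => result) acc =
      match rackAFind l.reverse with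
      | some n => some n
      | none => acc := by
  induction l generalizing acc with
  | nil => simp [rackAFind]
  | cons p rest ih =>
    simp only [List.foldl_cons, List.reverse_cons, rackAFind_append_singleton, ih]
    cases rackAFind rest.reverse <;> cases PySem.Int.ofStr? p <;> simp

-- ===== VERDICT (by name: the statement is the Claim_ definition above) =====
theorem rack_number_py_spec : Claim_equal_rack_number_py := by
  intro rack _
  unfold Spec_rack_number_py rack_number_py rack_number_py_alt
  cases rack with
  | none => rfl
  | some s =>
    simp only
    split_ifs with h
    · rfl
    · rw [foldl_eq_rackAFind_reverse]
      cases rackAFind ((PySem.Str.split? s "-").getD []).reverse <;> simp
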